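-- pv_equiv track=rewrite | github.com/wdimmy/MeTeoR | experiments/AAAI2023/meteor_reasoner/graphutil/multigraph.py | allzerocycle
-- ===== SOURCE A (Python) =====
-- def allzerocycle(results):
--     def helper(i, path):
--         if i == len(results):
--             if sum(path) != 0:
--                 return -1
--             else:
--                 return 0
--
--         for item in results[i]:
--             res = helper(i+1, path+[item])
--             if res == -1:
--                 return -1
--
--     res = helper(0, [])
--     if res is not None:
--         return True
--     else:
--         return False
-- ===== SOURCE B (Python) =====
-- def allzerocycle(results):
--     if not results:
--         return True
--     mins = 0
--     maxs = 0
--     for lst in results: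
--         if not lst:
--             return False
--         mins += min(lst)
--         maxs += max(lst)
--     return mins != 0 or maxs != 0
-- ===== Notes on version B (the rewrite author's own statement) =====
-- stated objective: alternative
-- what changed: Replaced the recursive enumeration of one-per-sublist combinations with a single pass summing each sublist's min and max: a nonzero combination exists iff the min-sum or the max-sum is nonzero; worst case drops from the product of sublist sizes to the total item count, though A's early exit makes it as fast in practice.
import Mathlib
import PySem

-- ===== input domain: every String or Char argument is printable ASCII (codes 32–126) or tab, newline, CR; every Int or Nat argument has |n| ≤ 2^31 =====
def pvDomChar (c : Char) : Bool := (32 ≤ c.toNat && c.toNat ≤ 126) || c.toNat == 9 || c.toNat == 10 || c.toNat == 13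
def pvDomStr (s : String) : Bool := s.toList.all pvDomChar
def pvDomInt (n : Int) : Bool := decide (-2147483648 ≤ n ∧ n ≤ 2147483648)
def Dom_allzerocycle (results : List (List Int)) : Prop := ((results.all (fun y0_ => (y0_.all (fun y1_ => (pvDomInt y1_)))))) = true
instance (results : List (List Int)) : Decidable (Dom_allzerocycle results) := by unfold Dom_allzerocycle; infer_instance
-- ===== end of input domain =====

-- B replaces A's recursive enumeration of one-per-sublist combinations by one pass over
-- per-sublist mins and maxes (a different algorithm); return values agree on all inputs.

-- ===== PORT A =====
-- helper(i, path) recursing on the suffix results[i:]; returns some (-1) / some 0 for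
-- Python's -1 / 0 and none for Python's implicit None.
mutual
  def azHelper : List (List Int) → List Int → Option Int
    | [], path => if path.sum ≠ 0 then some (-1) else some 0
    | l :: rest, path => azFor l rest path
  -- the 'for item in results[i]' loop of helper
  def azFor : List Int → List (List Int) → List Int → Option Int
    | [], _, _ => none
    | item :: more, rest, path =>
      if azHelper rest (path ++ [item]) == some (-1) then some (-1)
      else azFor more rest path
end

def allzerocycle (results : List (List Int)) : Bool :=
  match azHelper results [] with
  | some _ => true
  | none => false

-- ===== PORT B =====
-- the 'for lst in results' loop of Source B, carrying the two running sums;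
-- min(lst)/max(lst) on nonempty lst are the running fold (PySem.List.min?_id_cons/max?_id_cons)
def azScan : List (List Int) → Int → Int → Bool
  | [], mins, maxs => mins != 0 || maxs != 0
  | [] :: _, _, _ => false
  | (x :: t) :: rest, mins, maxs => azScan rest (mins + t.foldl min x) (maxs + t.foldl max x)

def allzerocycle_alt (results : List (List Int)) : Bool :=
  match results with
  | [] => true
  | _ :: _ => azScan results 0 0

-- ===== PRECONDITION & SPEC =====
def Spec_allzerocycle (results : List (List Int)) (out : Bool) : Prop := out = allzerocycle_alt results
instance (results : List (List Int)) (out : Bool) : Decidable (Spec_allzerocycle results out) := by unfold Spec_allzerocycle; infer_instance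

-- ===== CLAIM (what is proved, stated in full; the proofs are below) =====
def Claim_equal_allzerocycle : Prop := ∀ (results : List (List Int)), Dom_allzerocycle results → Spec_allzerocycle results (allzerocycle results)

-- ===== LEMMAS AND PROOFS =====

-- proof-side abstraction of A's search: does some one-per-sublist pick make s + picks ≠ 0?
def exNZ : List (List Int) → Int → Bool
  | [], s => s != 0
  | l :: rest, s => l.any (fun x => exNZ rest (s + x))

-- proof-side min/max of a sublist and their sums (0 on the empty list, never used there)
def minOf : List Int → Int
  | [] => 0
  | x :: t => t.foldl min x

def maxOf : List Int → Int
  | [] => 0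
  | x :: t => t.foldl max x

def mnsum (rs : List (List Int)) : Int := (rs.map minOf).sum
def mxsum (rs : List (List Int)) : Int := (rs.map maxOf).sum

theorem minOf_mem (x : Int) (t : List Int) : minOf (x :: t) ∈ x :: t := by
  have h := PySem.List.min?_id_cons (x := x) (t := t)
  exact PySem.List.min?_mem h

theorem maxOf_mem (x : Int) (t : List Int) : maxOf (x :: t) ∈ x :: t := by
  have h := PySem.List.max?_id_cons (x := x) (t := t)
  exact PySem.List.max?_mem h

theorem minOf_le (x : Int) (t : List Int) : ∀ y ∈ x :: t, minOf (x :: t) ≤ y := by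
  have h := PySem.List.min?_id_cons (x := x) (t := t)
  exact PySem.List.min?_isMin h

theorem le_maxOf (x : Int) (t : List Int) : ∀ y ∈ x :: t, y ≤ maxOf (x :: t) := by
  have h := PySem.List.max?_id_cons (x := x) (t := t)
  exact PySem.List.max?_isMax h

theorem mnsum_le_mxsum (rs : List (List Int)) (h : ∀ l ∈ rs, l ≠ []) :
    mnsum rs ≤ mxsum rs := by
  induction rs with
  | nil => simp [mnsum, mxsum]
  | cons l rest ih =>
    have hl : l ≠ [] := h l (by simp)
    obtain ⟨x, t, rfl⟩ : ∃ x t, l = x :: t := by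
      cases l with
      | nil => exact absurd rfl hl
      | cons a b => exact ⟨a, b, rfl⟩
    have h1 : minOf (x :: t) ≤ x := minOf_le x t x (by simp)
    have h2 : x ≤ maxOf (x :: t) := le_maxOf x t x (by simp)
    have h3 : mnsum rest ≤ mxsum rest := ih (fun l hl' => h l (by simp [hl']))
    simp only [mnsum, mxsum, List.map_cons, List.sum_cons] at *
    omega

-- characterisation of A's for-loop, given the characterisation of azHelper on rest
theorem azFor_char (rest : List (List Int)) (path : List Int)
    (hH : ∀ p : List Int, azHelper rest p =
      cond (exNZ rest p.sum) (some (-1)) (if rest = [] then some 0 else none)) :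
    ∀ items : List Int, azFor items rest path =
      cond (items.any (fun x => exNZ rest (path.sum + x))) (some (-1)) none := by
  intro items
  induction items with
  | nil => simp [azFor]
  | cons item more ihm =>
    rw [azFor, hH (path ++ [item])]
    have hs : (path ++ [item]).sum = path.sum + item := by simp
    rw [hs]
    by_cases hx : exNZ rest (path.sum + item)
    · simp [hx]
    · have hbeq : ((if rest = [] then some 0 else none : Option Int) == some (-1)) = false := by
        split <;> decide
      simp [hx, hbeq, ihm]

-- characterisation of A's helper
theorem azHelper_char (rest : List (List Int)) : ∀ path : List Int,
    azHelper rest path =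
      cond (exNZ rest path.sum) (some (-1)) (if rest = [] then some 0 else none) := by
  induction rest with
  | nil =>
    intro path
    by_cases h : path.sum = 0
    · simp [azHelper, exNZ, h, bne]
    · have hf : (path.sum == 0) = false := beq_eq_false_iff_ne.mpr h
      simp [azHelper, exNZ, h, bne, hf]
  | cons l rest ih =>
    intro path
    rw [azHelper, azFor_char rest path ih l]
    simp [exNZ]

-- key equivalence of the two criteria
theorem exNZ_char (rest : List (List Int)) : ∀ s : Int,
    exNZ rest s =
      (rest.all (fun l => decide (l ≠ [])) &&
        (decide (s + mnsum rest ≠ 0) || decide (s + mxsum rest ≠ 0))) := by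
  induction rest with
  | nil =>
    intro s
    by_cases h : s = 0 <;> simp [exNZ, mnsum, mxsum, h]
  | cons l rest ih =>
    intro s
    rw [exNZ]
    by_cases hall : rest.all (fun l => decide (l ≠ [])) = true
    · have hne : ∀ l' ∈ rest, l' ≠ [] := by
        intro l' hl'
        have := List.all_eq_true.mp hall l' hl'
        simpa using this
      have hmm := mnsum_le_mxsum rest hne
      cases l with
      | nil => simp [mnsum, mxsum]
      | cons x t =>
        rw [Bool.eq_iff_iff]
        simp only [List.any_eq_true]
        constructor
        · rintro ⟨y, hy, hx⟩
          rw [ih (s + y)] at hx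
          simp only [hall, Bool.true_and, Bool.or_eq_true, decide_eq_true_eq,
            mnsum, mxsum] at hx hmm ⊢
          have h1 := minOf_le x t y hy
          have h2 := le_maxOf x t y hy
          simp only [List.all_cons, Bool.and_eq_true, Bool.or_eq_true,
            decide_eq_true_eq, List.map_cons, List.sum_cons]
          refine ⟨⟨by simp, hall⟩, ?_⟩
          by_contra hcon
          push Not at hcon
          obtain ⟨e1, e2⟩ := hcon
          rcases hx with h0 | h0 <;> omega
        · intro hR
          simp only [List.all_cons, Bool.and_eq_true, Bool.or_eq_true,
            decide_eq_true_eq, mnsum, mxsum, List.map_cons, List.sum_cons] at hR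
          obtain ⟨-, hor⟩ := hR
          rcases hor with h0 | h0
          · refine ⟨minOf (x :: t), minOf_mem x t, ?_⟩
            rw [ih]
            simp only [hall, Bool.true_and, Bool.or_eq_true, decide_eq_true_eq,
              mnsum, mxsum]
            left; omega
          · refine ⟨maxOf (x :: t), maxOf_mem x t, ?_⟩
            rw [ih]
            simp only [hall, Bool.true_and, Bool.or_eq_true, decide_eq_true_eq,
              mnsum, mxsum]
            right; omega
    · rw [Bool.not_eq_true] at hall
      have h1 : (l.any fun x => exNZ rest (s + x)) = false := by
        rw [List.any_eq_false]
        intro x hx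
        rw [ih (s + x), hall, Bool.false_and]
        decide
      have h2 : ((l :: rest).all fun l => decide (l ≠ [])) = false := by
        rw [List.all_cons, hall, Bool.and_false]
      rw [h1, h2, Bool.false_and]

-- characterisation of B's loop
theorem azScan_char (rest : List (List Int)) : ∀ mins maxs : Int,
    azScan rest mins maxs =
      (rest.all (fun l => decide (l ≠ [])) &&
        (decide (mins + mnsum rest ≠ 0) || decide (maxs + mxsum rest ≠ 0))) := by
  induction rest with
  | nil =>
    intro mins maxs
    by_cases hm : mins = 0 <;> by_cases hM : maxs = 0 <;>
      simp [azScan, mnsum, mxsum, hm, hM, bne]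
  | cons l rest ih =>
    intro mins maxs
    cases l with
    | nil => simp [azScan, mnsum, mxsum]
    | cons x t =>
      rw [azScan, ih]
      simp [List.all_cons, mnsum, mxsum, minOf, maxOf, add_assoc]

-- ===== VERDICT (by name: the statement is the Claim_ definition above) =====
theorem allzerocycle_spec : Claim_equal_allzerocycle := by
  intro results _
  unfold Spec_allzerocycle
  cases results with
  | nil =>
    have hA := azHelper_char [] []
    simp [exNZ, bne] at hA
    simp [allzerocycle, allzerocycle_alt, hA]
  | cons l rest =>
    have hA := azHelper_char (l :: rest) []
    simp only [List.sum_nil] at hA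
    have hBv : allzerocycle_alt (l :: rest) = exNZ (l :: rest) 0 := by
      show azScan (l :: rest) 0 0 = _
      rw [azScan_char (l :: rest) 0 0, exNZ_char (l :: rest) 0]
    rw [hBv]
    cases hb : exNZ (l :: rest) 0 with
    | false => rw [hb] at hA; simp [allzerocycle, hA]
    | true => rw [hb] at hA; simp [allzerocycle, hA]
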